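-- pv_equiv track=rewrite | github.com/DiCarloLab-Delft/PycQED_py3 | pycqed/measurement/pulse_sequences/single_qubit_tek_seq_elts.py | prepend_pulses
-- ===== SOURCE A (Python) =====
-- from copy import deepcopy
--
-- def prepend_pulses(pulse_list, pulses_to_prepend):
--     """
--     Prepends a list of pulse to a list of pulses with correct referencing.
--     :param pulse_list: initial pulse list
--     :param pulses_to_prepend: pulse to prepend
--     :return:
--         list of pulses where prepended pulses are at the beginning of the
--         returned list
--     """
--     all_pulses = deepcopy(pulse_list)
--     for i, p in enumerate(reversed(pulses_to_prepend)):
--         try: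
--             p['ref_pulse'] = all_pulses[0]['name']
--         except KeyError:
--             all_pulses[0]['name'] = 'fist_non_prepended_pulse'
--             p['ref_pulse'] = all_pulses[0]['name']
--         p['name'] = p.get('name',
--                           f'prepended_pulse_{len(pulses_to_prepend) - i - 1}')
--         p['ref_point'] = 'start'
--         p['ref_point_new'] = 'end'
--         all_pulses = [p] + all_pulses
--     return all_pulses
-- ===== SOURCE B (Python) =====
-- from copy import deepcopy
--
-- def prepend_pulses(pulse_list, pulses_to_prepend):
--     """Forward single pass: each prepended pulse references the NEXT one by
--     (default) name; only the last one references the first original pulse."""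
--     all_pulses = deepcopy(pulse_list)
--     if pulses_to_prepend:
--         try:
--             first_name = all_pulses[0]['name']
--         except KeyError:
--             all_pulses[0]['name'] = 'fist_non_prepended_pulse'
--             first_name = all_pulses[0]['name']
--         m = len(pulses_to_prepend)
--         for j, p in enumerate(pulses_to_prepend):
--             if j + 1 < m:
--                 p['ref_pulse'] = pulses_to_prepend[j + 1].get(
--                     'name', f'prepended_pulse_{j + 1}')
--             else:
--                 p['ref_pulse'] = first_name
--             p['name'] = p.get('name', f'prepended_pulse_{j}')
--             p['ref_point'] = 'start'
--             p['ref_point_new'] = 'end'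
--     return list(pulses_to_prepend) + all_pulses
-- ===== Notes on version B (the rewrite author's own statement) =====
-- stated objective: alternative
-- what changed: Replaces the backwards loop that repeatedly rebuilds all_pulses (reading the reference name off the freshly grown head) with a single forward pass that computes each ref_pulse by lookahead into pulses_to_prepend and one final list concatenation.
import Mathlib
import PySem

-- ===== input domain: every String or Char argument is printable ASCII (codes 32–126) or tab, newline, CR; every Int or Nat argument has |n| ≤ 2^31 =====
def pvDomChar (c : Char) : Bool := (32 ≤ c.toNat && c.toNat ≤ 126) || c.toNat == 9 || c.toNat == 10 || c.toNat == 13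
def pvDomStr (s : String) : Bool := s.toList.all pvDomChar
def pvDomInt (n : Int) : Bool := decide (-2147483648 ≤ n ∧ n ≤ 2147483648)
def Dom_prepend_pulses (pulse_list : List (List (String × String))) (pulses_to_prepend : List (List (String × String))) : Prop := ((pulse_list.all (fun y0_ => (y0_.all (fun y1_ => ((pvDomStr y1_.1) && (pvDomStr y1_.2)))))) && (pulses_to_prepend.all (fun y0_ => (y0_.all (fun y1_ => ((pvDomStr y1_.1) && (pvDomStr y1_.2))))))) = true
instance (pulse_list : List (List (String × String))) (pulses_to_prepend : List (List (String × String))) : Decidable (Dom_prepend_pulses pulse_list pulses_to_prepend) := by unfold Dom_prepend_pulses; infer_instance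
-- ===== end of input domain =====

-- B replaces A's backwards loop (which re-reads the name off the freshly prepended head) by one
-- forward pass with lookahead plus a single concatenation; equivalence is about the RETURN value
-- (both Pythons also mutate the pulses_to_prepend dicts in place, in the same way).

-- ===== PORT A =====
-- shared by both ports: the try/except KeyError block 'p["ref_pulse"] = all_pulses[0]["name"]'
-- (both Source A and Source B contain this exact snippet)
def pvFixName (h : PySem.Dict String String) : PySem.Dict String String × String :=
  match h.get? "name" with
  | some n => (h, n)
  | none => (h.insert "name" "fist_non_prepended_pulse", "fist_non_prepended_pulse")

-- one iteration of A's loop body (ip = (i, p) from enumerate(reversed(...)));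
-- the [] case is unreachable inside Pre_ (Python raises IndexError there)
def pvStepA (m : Nat) (all_pulses : List (PySem.Dict String String))
    (ip : Int × PySem.Dict String String) : List (PySem.Dict String String) :=
  match all_pulses with
  | [] => []
  | h :: t =>
    let hn := pvFixName h
    let p := ip.2.insert "ref_pulse" hn.2
    let p := p.insert "name" (p.getD "name" ("prepended_pulse_" ++ PySem.Int.toStr ((m : Int) - ip.1 - 1)))
    let p := p.insert "ref_point" "start"
    let p := p.insert "ref_point_new" "end"
    p :: hn.1 :: t

def prepend_pulses (pulse_list : List (List (String × String))) (pulses_to_prepend : List (List (String × String))) : List (List (String × String)) :=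
  let all_pulses := pulse_list.map PySem.Dict.mk
  let res := (PySem.List.enumerate ((pulses_to_prepend.map PySem.Dict.mk).reverse) 0).foldl
      (pvStepA pulses_to_prepend.length) all_pulses
  res.map (fun d => d.items)

-- ===== PORT B =====
-- forward pass of Source B: ref_pulse comes from the NEXT pulse (or first_name for the last one)
def pvAltGo (first_name : String) (j : Int) (ps : List (PySem.Dict String String)) : List (PySem.Dict String String) :=
  match ps with
  | [] => []
  | p :: rest =>
    let rp := match rest with
      | [] => first_name
      | q :: _ => q.getD "name" ("prepended_pulse_" ++ PySem.Int.toStr (j + 1))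
    let p := p.insert "ref_pulse" rp
    let p := p.insert "name" (p.getD "name" ("prepended_pulse_" ++ PySem.Int.toStr j))
    let p := p.insert "ref_point" "start"
    let p := p.insert "ref_point_new" "end"
    p :: pvAltGo first_name (j + 1) rest

def prepend_pulses_alt (pulse_list : List (List (String × String))) (pulses_to_prepend : List (List (String × String))) : List (List (String × String)) :=
  let all_pulses := pulse_list.map PySem.Dict.mk
  match pulses_to_prepend with
  | [] => all_pulses.map (fun d => d.items)
  | _ =>
    match all_pulses with
    | [] => []   -- Python B raises IndexError here, like A; outside Pre_
    | h :: t =>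
      let hn := pvFixName h
      ((pvAltGo hn.2 0 (pulses_to_prepend.map PySem.Dict.mk)) ++ hn.1 :: t).map (fun d => d.items)

-- ===== PRECONDITION & SPEC =====
-- Pre_ excludes exactly the inputs where both Pythons raise IndexError:
-- a non-empty pulses_to_prepend with an empty pulse_list.
def Pre_prepend_pulses (pulse_list : List (List (String × String))) (pulses_to_prepend : List (List (String × String))) : Prop :=
  pulse_list ≠ [] ∨ pulses_to_prepend = []
instance (pulse_list : List (List (String × String))) (pulses_to_prepend : List (List (String × String))) : Decidable (Pre_prepend_pulses pulse_list pulses_to_prepend) := by unfold Pre_prepend_pulses; infer_instance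
def pvWitness_prepend_pulses : (List (List (String × String))) × (List (List (String × String))) :=
  ([[("name", "p0"), ("x", "1")]], [[("y", "2")], [("name", "q")]])

def Spec_prepend_pulses (pulse_list : List (List (String × String))) (pulses_to_prepend : List (List (String × String))) (out : List (List (String × String))) : Prop := out = prepend_pulses_alt pulse_list pulses_to_prepend
instance (pulse_list : List (List (String × String))) (pulses_to_prepend : List (List (String × String))) (out : List (List (String × String))) : Decidable (Spec_prepend_pulses pulse_list pulses_to_prepend out) := by unfold Spec_prepend_pulses; infer_instance

-- ===== CLAIM (what is proved, stated in full; the proofs are below) =====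
def Claim_equal_prepend_pulses : Prop := ∀ (pulse_list : List (List (String × String))) (pulses_to_prepend : List (List (String × String))), Dom_prepend_pulses pulse_list pulses_to_prepend → Pre_prepend_pulses pulse_list pulses_to_prepend → Spec_prepend_pulses pulse_list pulses_to_prepend (prepend_pulses pulse_list pulses_to_prepend)

-- ===== LEMMAS AND PROOFS =====

-- A's loop, re-expressed: processing reversed(l) while consing onto the accumulator
-- is the reversed-order recursion pvProcR (innermost call processes the last element).
def pvProcR (m : Nat) : List (PySem.Dict String String) → List (PySem.Dict String String) → List (PySem.Dict String String)
  | [], acc => acc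
  | p :: rest, acc => pvStepA m (pvProcR m rest acc) ((rest.length : Int), p)

theorem pv_foldRev (m : Nat) (l acc : List (PySem.Dict String String)) :
    (PySem.List.enumerate l.reverse 0).foldl (pvStepA m) acc = pvProcR m l acc := by
  induction l generalizing acc with
  | nil => rfl
  | cons p rest ih =>
    simp [List.reverse_cons, PySem.List.enumerate_append, List.foldl_append,
      PySem.List.enumerate_cons, PySem.List.enumerate_nil, pvProcR, ih]

-- the "name" entry of a pulse processed by either loop body
theorem pv_name_of_T (p : PySem.Dict String String) (rp s : String) :
    ((((p.insert "ref_pulse" rp).insert "name"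
        ((p.insert "ref_pulse" rp).getD "name" s)).insert "ref_point" "start").insert
        "ref_point_new" "end").get? "name"
      = some (p.getD "name" s) := by
  simp [PySem.Dict.get?_insert, PySem.Dict.getD_insert]

theorem pv_fixName_named (d : PySem.Dict String String) (nm : String)
    (hd : d.get? "name" = some nm) : pvFixName d = (d, nm) := by
  simp [pvFixName, hd]

-- main bridge: on a non-empty prepend list and a head h of the copied pulse_list,
-- A's reversed recursion equals B's forward pass followed by one concatenation.
theorem pv_main (m : Nat) (l' : List (PySem.Dict String String)) (p : PySem.Dict String String)
    (j : Int) (h : PySem.Dict String String) (t : List (PySem.Dict String String))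
    (hm : j + (l'.length : Int) + 1 = (m : Int)) :
    pvProcR m (p :: l') (h :: t)
      = pvAltGo (pvFixName h).2 j (p :: l') ++ (pvFixName h).1 :: t := by
  induction l' generalizing j p with
  | nil =>
    have hj : (m : Int) - (([] : List (PySem.Dict String String)).length : Int) - 1 = j := by
      simp only [List.length_nil, Nat.cast_zero] at hm ⊢; omega
    simp only [pvProcR, pvAltGo, pvStepA, hj]
    rfl
  | cons q rest ih =>
    have hrec := ih q (j + 1) (by
      simp only [List.length_cons] at hm ⊢; push_cast at hm ⊢; omega)
    simp only [pvProcR] at hrec ⊢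
    rw [hrec]
    have hidx : (m : Int) - ((q :: rest).length : Int) - 1 = j := by
      simp only [List.length_cons] at hm ⊢; push_cast at hm ⊢; omega
    cases rest with
    | nil =>
      have hq := pv_name_of_T q (pvFixName h).2
        ("prepended_pulse_" ++ PySem.Int.toStr (j + 1))
      simp only [pvAltGo, List.cons_append, pvStepA, hidx, pv_fixName_named _ _ hq]
    | cons r rest' =>
      have hq := pv_name_of_T q
        (r.getD "name" ("prepended_pulse_" ++ PySem.Int.toStr (j + 1 + 1)))
        ("prepended_pulse_" ++ PySem.Int.toStr (j + 1))
      simp only [pvAltGo, List.cons_append, pvStepA, hidx, pv_fixName_named _ _ hq]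

-- ===== VERDICT (by name: the statement is the Claim_ definition above) =====
theorem prepend_pulses_spec : Claim_equal_prepend_pulses := by
  intro pl pp _ hpre
  unfold Spec_prepend_pulses prepend_pulses prepend_pulses_alt
  cases pp with
  | nil => rfl
  | cons p0 l =>
    cases pl with
    | nil => cases hpre with
      | inl h => exact absurd rfl h
      | inr h => cases h
    | cons h0 t0 =>
      simp only [List.map_cons, pv_foldRev]
      rw [pv_main (p0 :: l).length (l.map PySem.Dict.mk)
        (PySem.Dict.mk p0) 0 (PySem.Dict.mk h0) (t0.map PySem.Dict.mk) (by simp)]
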